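-- pv_equiv track=rewrite | github.com/yeseong31/coding-test | Programmers/파일명_정렬.py | solution
-- ===== SOURCE A (Python) =====
-- def solution(files):
--     answer = []
--     for file in files:
--         head, number, tail = '', '', ''
--         flag = True
--         for i, v in enumerate(file):
--             if flag and (v.isalpha() or v in ['-', ' ', ',']):
--                 head += v
--             elif v.isdigit():
--                 flag = False
--                 number += v
--             else:
--                 tail += file[i:]
--                 break
--         answer.append([head, number, tail])
--
--     return [''.join(v) for v in sorted(answer, key=lambda x: (x[0].lower(), int(x[1])))]
-- ===== SOURCE B (Python) =====
-- def solution(files):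
--     # Key insight: head + number + tail is always the original string, so there is
--     # nothing to rebuild: sort the file names themselves by the (head.lower(), int(number))
--     # key, computed with str.lstrip instead of any per-character loop.
--     HEAD = 'abcdefghijklmnopqrstuvwxyzABCDEFGHIJKLMNOPQRSTUVWXYZ-, '
--     DIGITS = '0123456789'
--
--     def key(f):
--         rest = f.lstrip(HEAD)
--         head = f[:len(f) - len(rest)]
--         number = rest[:len(rest) - len(rest.lstrip(DIGITS))]
--         return (head.lower(), int(number))
--
--     return sorted(files, key=key)
-- ===== Notes on version B (the rewrite author's own statement) =====
-- stated objective: idiomatic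
-- what changed: B never builds or re-joins the [head, number, tail] triples: using the invariant head+number+tail == file it sorts the original strings directly with a (head.lower(), int(number)) key computed by str.lstrip slicing, eliminating A's per-character flag state machine and the join pass.
import Mathlib
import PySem

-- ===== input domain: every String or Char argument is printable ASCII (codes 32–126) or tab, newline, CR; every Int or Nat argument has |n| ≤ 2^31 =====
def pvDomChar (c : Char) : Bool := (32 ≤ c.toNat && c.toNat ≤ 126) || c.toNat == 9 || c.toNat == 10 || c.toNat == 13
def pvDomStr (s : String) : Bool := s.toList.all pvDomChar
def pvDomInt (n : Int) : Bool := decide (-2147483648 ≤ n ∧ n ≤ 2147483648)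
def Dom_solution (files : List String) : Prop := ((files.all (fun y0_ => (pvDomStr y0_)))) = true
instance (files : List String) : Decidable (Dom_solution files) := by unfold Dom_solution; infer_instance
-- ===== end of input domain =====

-- B sorts the original file names directly (head+number+tail reconstructs the string), with a
-- (head.lower(), int(number)) key computed by lstrip slicing — no triple build, no flag loop, no join pass.

-- ===== PORT A =====
-- 'v.isalpha() or v in ['-', ' ', ',']'
def pvHeadChar (v : Char) : Bool :=
  PySem.Chars.isalpha v || v == '-' || v == ' ' || v == ','

-- the inner 'for i, v in enumerate(file)' with accumulators head/number/tail and flag;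
-- the break branch receives 'file[i:] = v :: rest'
def pvLoopA (head number tail : List Char) (flag : Bool) : List Char → List Char × List Char × List Char
  | [] => (head, number, tail)
  | v :: rest =>
      if flag && pvHeadChar v then pvLoopA (head ++ [v]) number tail flag rest
      else if PySem.Chars.isdigit v then pvLoopA head (number ++ [v]) tail false rest
      else (head, number, tail ++ (v :: rest))

-- int(x[1]): Python raises ValueError when the number part is empty — exactly the inputs Pre_solution
-- excludes, so the '.getD 0' default is never the value used on admitted inputs.
def solution (files : List String) : List String :=
  let answer := files.foldl (fun acc file => acc ++ [pvLoopA [] [] [] true file.toList]) []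
  (PySem.List.sorted2 answer
      (fun x => PySem.Chars.lower x.1)
      (fun x => (PySem.Int.ofChars? x.2.1).getD 0)).map
    (fun v => String.ofList (v.1 ++ v.2.1 ++ v.2.2))

-- ===== PORT B =====
-- the HEAD and DIGITS character-set constants of Source B, as char lists
def pvHeadSet : List Char := ['a', 'b', 'c', 'd', 'e', 'f', 'g', 'h', 'i', 'j', 'k', 'l', 'm', 'n', 'o', 'p', 'q', 'r', 's', 't', 'u', 'v', 'w', 'x', 'y', 'z', 'A', 'B', 'C', 'D', 'E', 'F', 'G', 'H', 'I', 'J', 'K', 'L', 'M', 'N', 'O', 'P', 'Q', 'R', 'S', 'T', 'U', 'V', 'W', 'X', 'Y', 'Z', '-', ',', ' ']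
def pvDigitSet : List Char := ['0', '1', '2', '3', '4', '5', '6', '7', '8', '9']

-- hand port (exact): str.lstrip(chars) removes the longest leading run of characters from the set
def pvLstrip (chars s : List Char) : List Char := s.dropWhile (fun c => chars.contains c)

-- key(f).0 = head.lower(); head = f[:len(f)-len(rest)], rest = f.lstrip(HEAD)
def pvKey1 (f : String) : List Char :=
  let cs := f.toList
  let rest := pvLstrip pvHeadSet cs
  PySem.Chars.lower (cs.take (cs.length - rest.length))

-- key(f).1 = int(number); number = rest[:len(rest)-len(rest.lstrip(DIGITS))] — int('') raises
-- ValueError, excluded by Pre_solution (the '.getD 0' default is never the value used there)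
def pvKey2 (f : String) : Int :=
  let cs := f.toList
  let rest := pvLstrip pvHeadSet cs
  let number := rest.take (rest.length - (pvLstrip pvDigitSet rest).length)
  (PySem.Int.ofChars? number).getD 0

-- sorted(files, key=key): the original strings, sorted stably by the tuple key
def solution_alt (files : List String) : List String :=
  PySem.List.sorted2 files pvKey1 pvKey2

-- ===== PRECONDITION & SPEC =====
-- Pre_ excludes exactly the files whose first character after the head prefix is missing or not a
-- digit: there the number part is empty and Python's int('') raises ValueError in both A and B.
def Pre_solution (files : List String) : Prop :=
  files.all (fun f => (f.toList.dropWhile pvHeadChar).head?.any PySem.Chars.isdigit) = true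
instance (files : List String) : Decidable (Pre_solution files) := by unfold Pre_solution; infer_instance
def pvWitness_solution : List String := ["img12.png", "IMG 1x", "-a,b7"]

def Spec_solution (files : List String) (out : List String) : Prop := out = solution_alt files
instance (files : List String) (out : List String) : Decidable (Spec_solution files out) := by unfold Spec_solution; infer_instance

-- ===== CLAIM (what is proved, stated in full; the proofs are below) =====
def Claim_equal_solution : Prop := ∀ (files : List String), Dom_solution files → Pre_solution files → Spec_solution files (solution files)

-- ===== LEMMAS AND PROOFS =====

-- Source B's HEAD-set membership is A's per-character head test, for every Char
theorem pvHead_bridge (c : Char) : pvHeadSet.contains c = pvHeadChar c := by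
  have h1 : ∀ a : Char, (c = a) ↔ c.toNat = a.toNat :=
    fun a => ⟨fun h => h ▸ rfl, fun h => Char.ext (UInt32.toNat_inj.mp h)⟩
  have h2 : ∀ a : Char, (a ≤ c) ↔ a.toNat ≤ c.toNat :=
    fun a => by rw [Char.le_def, UInt32.le_iff_toNat_le]; exact Iff.rfl
  have h3 : ∀ a : Char, (c ≤ a) ↔ c.toNat ≤ a.toNat :=
    fun a => by rw [Char.le_def, UInt32.le_iff_toNat_le]; exact Iff.rfl
  rw [Bool.eq_iff_iff]
  show pvHeadSet.contains c = true ↔ _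
  simp only [pvHeadSet, pvHeadChar, PySem.Chars.isalpha, PySem.Chars.isupper, PySem.Chars.islower,
    List.contains_eq_mem, decide_eq_true_eq, List.mem_cons,
    List.not_mem_nil, or_false, h1, h2, h3, Bool.or_eq_true, Bool.and_eq_true, beq_iff_eq]
  simp only [show (' ').toNat = 32 from rfl, show (',').toNat = 44 from rfl, show ('-').toNat = 45 from rfl, show ('A').toNat = 65 from rfl, show ('B').toNat = 66 from rfl, show ('C').toNat = 67 from rfl, show ('D').toNat = 68 from rfl, show ('E').toNat = 69 from rfl, show ('F').toNat = 70 from rfl, show ('G').toNat = 71 from rfl, show ('H').toNat = 72 from rfl, show ('I').toNat = 73 from rfl, show ('J').toNat = 74 from rfl, show ('K').toNat = 75 from rfl, show ('L').toNat = 76 from rfl, show ('M').toNat = 77 from rfl, show ('N').toNat = 78 from rfl, show ('O').toNat = 79 from rfl, show ('P').toNat = 80 from rfl, show ('Q').toNat = 81 from rfl, show ('R').toNat = 82 from rfl, show ('S').toNat = 83 from rfl, show ('T').toNat = 84 from rfl, show ('U').toNat = 85 from rfl, show ('V').toNat = 86 from rfl, show ('W').toNat = 87 from rfl, show ('X').toNat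 = 88 from rfl, show ('Y').toNat = 89 from rfl, show ('Z').toNat = 90 from rfl, show ('a').toNat = 97 from rfl, show ('b').toNat = 98 from rfl, show ('c').toNat = 99 from rfl, show ('d').toNat = 100 from rfl, show ('e').toNat = 101 from rfl, show ('f').toNat = 102 from rfl, show ('g').toNat = 103 from rfl, show ('h').toNat = 104 from rfl, show ('i').toNat = 105 from rfl, show ('j').toNat = 106 from rfl, show ('k').toNat = 107 from rfl, show ('l').toNat = 108 from rfl, show ('m').toNat = 109 from rfl, show ('n').toNat = 110 from rfl, show ('o').toNat = 111 from rfl, show ('p').toNat = 112 from rfl, show ('q').toNat = 113 from rfl, show ('r').toNat = 114 from rfl, show ('s').toNat = 115 from rfl, show ('t').toNat = 116 from rfl, show ('u').toNat = 117 from rfl, show ('v').toNat = 118 from rfl, show ('w').toNat = 119 from rfl, show ('x').toNat = 120 from rfl, show ('y').toNat = 121 from rfl, show ('z').toNat = 122 from rfl]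
  omega

-- Source B's DIGITS-set membership is Python's isdigit, for every Char
theorem pvDigit_bridge (c : Char) : pvDigitSet.contains c = PySem.Chars.isdigit c := by
  have h1 : ∀ a : Char, (c = a) ↔ c.toNat = a.toNat :=
    fun a => ⟨fun h => h ▸ rfl, fun h => Char.ext (UInt32.toNat_inj.mp h)⟩
  have h2 : ∀ a : Char, (a ≤ c) ↔ a.toNat ≤ c.toNat :=
    fun a => by rw [Char.le_def, UInt32.le_iff_toNat_le]; exact Iff.rfl
  have h3 : ∀ a : Char, (c ≤ a) ↔ c.toNat ≤ a.toNat :=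
    fun a => by rw [Char.le_def, UInt32.le_iff_toNat_le]; exact Iff.rfl
  rw [Bool.eq_iff_iff]
  show pvDigitSet.contains c = true ↔ _
  simp only [pvDigitSet, PySem.Chars.isdigit, List.contains_eq_mem, decide_eq_true_eq,
    List.mem_cons, List.not_mem_nil, or_false, h1, h2, h3, Bool.and_eq_true]
  simp only [show ('0').toNat = 48 from rfl, show ('1').toNat = 49 from rfl, show ('2').toNat = 50 from rfl, show ('3').toNat = 51 from rfl, show ('4').toNat = 52 from rfl, show ('5').toNat = 53 from rfl, show ('6').toNat = 54 from rfl, show ('7').toNat = 55 from rfl, show ('8').toNat = 56 from rfl, show ('9').toNat = 57 from rfl]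
  omega

theorem pvLstrip_head (s : List Char) : pvLstrip pvHeadSet s = s.dropWhile pvHeadChar := by
  unfold pvLstrip
  rw [show (fun c => pvHeadSet.contains c) = pvHeadChar from funext pvHead_bridge]

theorem pvLstrip_digit (s : List Char) : pvLstrip pvDigitSet s = s.dropWhile PySem.Chars.isdigit := by
  unfold pvLstrip
  rw [show (fun c => pvDigitSet.contains c) = PySem.Chars.isdigit from funext pvDigit_bridge]

-- slicing to the lstrip boundary is takeWhile
theorem take_sub_dropWhile (p : Char → Bool) (s : List Char) :
    s.take (s.length - (s.dropWhile p).length) = s.takeWhile p := by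
  have hlen : (s.takeWhile p).length + (s.dropWhile p).length = s.length := by
    conv_rhs => rw [← List.takeWhile_append_dropWhile (p := p) (l := s)]
    rw [List.length_append]
  have hsub : s.length - (s.dropWhile p).length = (s.takeWhile p).length := by omega
  rw [hsub]
  exact (List.prefix_iff_eq_take.mp (List.takeWhile_prefix p)).symm

-- phase 2 of A's loop (flag = False): number collects the digit run, tail gets the rest
theorem pvLoopA_false (f : List Char) : ∀ head number : List Char,
    pvLoopA head number [] false f
      = (head, number ++ f.takeWhile PySem.Chars.isdigit, f.dropWhile PySem.Chars.isdigit) := by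
  induction f with
  | nil => intro head number; simp [pvLoopA]
  | cons v rest ih =>
      intro head number
      by_cases h : PySem.Chars.isdigit v = true <;>
        simp [pvLoopA, List.takeWhile, List.dropWhile, h, ih]

-- phase 1 (flag = True): A's loop computes the three boundary slices
theorem pvLoopA_true (f : List Char) : ∀ head : List Char,
    pvLoopA head [] [] true f
      = (head ++ f.takeWhile pvHeadChar,
         (f.dropWhile pvHeadChar).takeWhile PySem.Chars.isdigit,
         (f.dropWhile pvHeadChar).dropWhile PySem.Chars.isdigit) := by
  induction f with
  | nil => intro head; simp [pvLoopA]
  | cons v rest ih =>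
      intro head
      by_cases hh : pvHeadChar v = true
      · simp [pvLoopA, List.takeWhile, List.dropWhile, hh, ih]
      · by_cases hd : PySem.Chars.isdigit v = true <;>
          simp [pvLoopA, List.takeWhile, List.dropWhile, hh, hd, pvLoopA_false]

-- inserting a mapped element into a mapped list is mapping the insertion
theorem insertBy_map {α β : Type} (g : α → β) (bf : β → β → Bool) (x : α) (l : List α) :
    PySem.List.insertBy bf (g x) (l.map g)
      = (PySem.List.insertBy (fun a b => bf (g a) (g b)) x l).map g := by
  induction l with
  | nil => rfl
  | cons y ys ih =>
      by_cases h : bf (g x) (g y) = true <;> simp [PySem.List.insertBy, h, ih]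

theorem foldl_insertBy_map {α β : Type} (g : α → β) (bf : β → β → Bool) (l : List α) :
    ∀ acc : List α,
    (l.map g).foldl (fun acc x => PySem.List.insertBy bf x acc) (acc.map g)
      = (l.foldl (fun acc x => PySem.List.insertBy (fun a b => bf (g a) (g b)) x acc) acc).map g := by
  induction l with
  | nil => intro acc; rfl
  | cons y ys ih =>
      intro acc
      rw [List.map_cons, List.foldl_cons, List.foldl_cons, insertBy_map g bf y acc]
      exact ih _

-- the stable tuple-key sort commutes with mapping, the keys composing with the map
theorem sorted2_map {α β : Type} (g : α → β) (k1 : β → List Char) (k2 : β → Int) (l : List α) :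
    PySem.List.sorted2 (l.map g) k1 k2
      = (PySem.List.sorted2 l (fun x => k1 (g x)) (fun x => k2 (g x))).map g := by
  unfold PySem.List.sorted2
  simpa using foldl_insertBy_map g
    (fun a b => decide (k1 a < k1 b) || !decide (k1 b < k1 a) && decide (k2 a < k2 b)) l []

-- ===== VERDICT (by name: the statement is the Claim_ definition above) =====
theorem solution_spec : Claim_equal_solution := by
  intro files _ _
  show solution files = solution_alt files
  unfold solution solution_alt
  rw [PySem.List.foldl_append_singleton_eq_map]
  simp only [List.nil_append]
  rw [show (fun file : String => pvLoopA [] [] [] true file.toList)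
        = (fun file : String =>
            (file.toList.takeWhile pvHeadChar,
             (file.toList.dropWhile pvHeadChar).takeWhile PySem.Chars.isdigit,
             (file.toList.dropWhile pvHeadChar).dropWhile PySem.Chars.isdigit))
      from funext fun file => by simpa using pvLoopA_true file.toList []]
  rw [sorted2_map]
  have hk1 : (fun f : String =>
      PySem.Chars.lower (f.toList.takeWhile pvHeadChar)) = pvKey1 := by
    funext f
    simp only [pvKey1, pvLstrip_head]
    rw [take_sub_dropWhile]
  have hk2 : (fun f : String =>
      (PySem.Int.ofChars? ((f.toList.dropWhile pvHeadChar).takeWhile PySem.Chars.isdigit)).getD 0)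
        = pvKey2 := by
    funext f
    simp only [pvKey2, pvLstrip_head, pvLstrip_digit]
    rw [take_sub_dropWhile]
  rw [List.map_map, hk1, hk2]
  simp only [Function.comp_def]
  rw [show (fun x : String => String.ofList (x.toList.takeWhile pvHeadChar
        ++ (x.toList.dropWhile pvHeadChar).takeWhile PySem.Chars.isdigit
        ++ (x.toList.dropWhile pvHeadChar).dropWhile PySem.Chars.isdigit)) = fun x => x
      from funext fun x => by
        rw [List.append_assoc, List.takeWhile_append_dropWhile,
          List.takeWhile_append_dropWhile, String.ofList_toList],
    List.map_id']
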